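-- pv_equiv track=rewrite | github.com/rmusser01/tldw_chatbook | tldw_chatbook/Evals/ui_integration.py | group_runs_by_status
-- ===== SOURCE A (Python) =====
-- from typing import Dict, Any, Optional
--
-- def group_runs_by_status(runs: list) -> Dict[str, list]:
--     """Group runs by their status."""
--     grouped = {
--         'completed': [],
--         'failed': [],
--         'running': [],
--         'cancelled': [],
--         'pending': []
--     }
--
--     for run in runs:
--         status = run.get('status', 'unknown').lower()
--         if status in grouped:
--             grouped[status].append(run)
--         else:
--             grouped.setdefault('other', []).append(run)
--
--     return grouped
-- ===== SOURCE B (Python) =====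
-- def group_runs_by_status(runs: list):
--     """Group runs by their status."""
--     keys = ['completed', 'failed', 'running', 'cancelled', 'pending']
--     grouped = {s: [r for r in runs if r.get('status', 'unknown').lower() == s]
--                for s in keys}
--     others = [r for r in runs if r.get('status', 'unknown').lower() not in keys]
--     if others:
--         grouped['other'] = others
--     return grouped
-- ===== Notes on version B (the rewrite author's own statement) =====
-- stated objective: alternative
-- what changed: Replaced A's single pass that dispatches each run into a mutable dict with one filtering comprehension per known status plus a final pass collecting unmatched runs into an optional 'other' bucket.
import Mathlib
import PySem

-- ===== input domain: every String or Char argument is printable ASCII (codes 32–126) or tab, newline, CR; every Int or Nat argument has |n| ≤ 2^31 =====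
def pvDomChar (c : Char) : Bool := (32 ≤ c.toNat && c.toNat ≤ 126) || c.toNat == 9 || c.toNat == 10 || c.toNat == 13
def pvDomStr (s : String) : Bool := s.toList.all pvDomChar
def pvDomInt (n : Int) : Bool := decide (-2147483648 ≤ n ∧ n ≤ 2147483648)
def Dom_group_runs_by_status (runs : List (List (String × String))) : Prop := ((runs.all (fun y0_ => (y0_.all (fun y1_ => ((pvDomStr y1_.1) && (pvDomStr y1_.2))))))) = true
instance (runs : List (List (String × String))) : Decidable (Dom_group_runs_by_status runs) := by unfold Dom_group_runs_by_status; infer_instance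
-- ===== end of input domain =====

-- B replaces A's single dispatching pass over `runs` (mutable dict, append per run) with one
-- filtering pass per known status plus a final pass collecting the unmatched runs; alternative, not faster.

-- shared helper: run.get('status', 'unknown').lower()
def runStatus (run : List (String × String)) : String :=
  PySem.Str.lower ((PySem.Dict.mk run).getD "status" "unknown")

-- ===== PORT A =====
def group_runs_by_status (runs : List (List (String × String))) : List (String × List (List (String × String))) :=
  let grouped : PySem.Dict String (List (List (String × String))) :=
    (((((PySem.Dict.empty.insert "completed" []).insert "failed" []).insert "running" []).insert
        "cancelled" []).insert "pending" [])
  let grouped := runs.foldl (fun d run =>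
    let status := runStatus run
    if d.contains status then
      d.modify status [] (· ++ [run])           -- grouped[status].append(run)
    else
      d.modify "other" [] (· ++ [run])          -- grouped.setdefault('other', []).append(run): set to default [] if absent, then append
    ) grouped
  grouped.items

-- ===== PORT B =====
def knownStatuses : List String := ["completed", "failed", "running", "cancelled", "pending"]

def group_runs_by_status_alt (runs : List (List (String × String))) : List (String × List (List (String × String))) :=
  let grouped := knownStatuses.map (fun s => (s, runs.filter (fun r => runStatus r == s)))
  let others := runs.filter (fun r => !(knownStatuses.contains (runStatus r)))
  if others.isEmpty then grouped else grouped ++ [("other", others)]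

-- ===== PRECONDITION & SPEC =====
def Spec_group_runs_by_status (runs : List (List (String × String))) (out : List (String × List (List (String × String)))) : Prop := out = group_runs_by_status_alt runs
instance (runs : List (List (String × String))) (out : List (String × List (List (String × String)))) : Decidable (Spec_group_runs_by_status runs out) := by unfold Spec_group_runs_by_status; infer_instance

-- ===== CLAIM (what is proved, stated in full; the proofs are below) =====
def Claim_equal_group_runs_by_status : Prop := ∀ (runs : List (List (String × String))), Dom_group_runs_by_status runs → Spec_group_runs_by_status runs (group_runs_by_status runs)

-- ===== LEMMAS AND PROOFS =====

-- the bucket A's loop sends a run to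
def keyOf (r : List (String × String)) : String :=
  if knownStatuses.contains (runStatus r) then runStatus r else "other"

-- A's loop body is `modify (keyOf run)` as long as the dict's keys are knownStatuses plus possibly "other"
lemma foldA_eq_foldKey (runs : List (List (String × String)))
    (d : PySem.Dict String (List (List (String × String))))
    (h1 : ∀ s ∈ knownStatuses, d.contains s = true)
    (h2 : ∀ s, d.contains s = true → s ∈ knownStatuses ∨ s = "other") :
    runs.foldl (fun d run =>
      let status := runStatus run
      if d.contains status then d.modify status [] (· ++ [run])
      else d.modify "other" [] (· ++ [run])) d
    = runs.foldl (fun d run => d.modify (keyOf run) [] (· ++ [run])) d := by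
  induction runs generalizing d with
  | nil => rfl
  | cons run rest ih =>
    have hbody : (if d.contains (runStatus run) then d.modify (runStatus run) [] (· ++ [run])
        else d.modify "other" [] (· ++ [run])) = d.modify (keyOf run) [] (· ++ [run]) := by
      by_cases hc : d.contains (runStatus run) = true
      · rw [if_pos hc]
        rcases h2 _ hc with hk | ho
        · unfold keyOf
          rw [if_pos (by simpa using hk)]
        · unfold keyOf
          by_cases hkc : knownStatuses.contains (runStatus run) = true
          · rw [if_pos hkc]
          · rw [if_neg hkc, ho]
      · rw [if_neg hc]
        have hnk : ¬ knownStatuses.contains (runStatus run) = true :=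
          fun h => hc (h1 _ (by simpa using h))
        unfold keyOf
        rw [if_neg hnk]
    simp only [List.foldl_cons]
    rw [hbody]
    apply ih
    · intro s hs
      rw [PySem.Dict.contains_modify]
      simp [h1 s hs]
    · intro s hcs
      rw [PySem.Dict.contains_modify] at hcs
      rcases Bool.or_eq_true_iff.mp hcs with hek | hdc
      · have hsk : s = keyOf run := by simpa using hek
        subst hsk
        unfold keyOf
        split
        · exact Or.inl (by simpa using (by assumption : knownStatuses.contains (runStatus run) = true))
        · exact Or.inr rfl
      · exact h2 _ hdc

-- value of each bucket after the keyed fold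
lemma key_fold_getD (runs : List (List (String × String)))
    (d : PySem.Dict String (List (List (String × String)))) (c : String) :
    (runs.foldl (fun d r => d.modify (keyOf r) [] (· ++ [r])) d).getD c []
      = d.getD c [] ++ runs.filter (fun r => keyOf r == c) := by
  have h := PySem.Dict.getD_foldl_modify_append (runs.map (fun r => (keyOf r, r))) d c
  rw [List.foldl_map] at h
  rw [h, List.filter_map]
  simp [Function.comp_def]

-- keys after the keyed fold
lemma key_fold_keys (runs : List (List (String × String)))
    (d : PySem.Dict String (List (List (String × String)))) :
    (runs.foldl (fun d r => d.modify (keyOf r) [] (· ++ [r])) d).keys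
      = PySem.Set.update d.keys (runs.map keyOf) :=
  PySem.Dict.keys_foldl_modify_key runs keyOf [] (fun _ r => (· ++ [r])) d

-- a Nodup list of strings all equal to "other" is [] or ["other"]
lemma nodup_all_other (l : List String) (h : ∀ y ∈ l, y = "other") (hn : l.Nodup) :
    l = [] ∨ l = ["other"] := by
  match l, h, hn with
  | [], _, _ => exact Or.inl rfl
  | [y], h, _ => exact Or.inr (by rw [h y (by simp)])
  | y :: z :: t, h, hn =>
    exfalso
    have hy := h y (by simp)
    have hz := h z (by simp)
    subst hy
    rw [hz] at hn
    simp at hn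

lemma keyOf_eq_other (r : List (String × String)) :
    (keyOf r == "other") = !(knownStatuses.contains (runStatus r)) := by
  unfold keyOf
  by_cases hc : knownStatuses.contains (runStatus r) = true
  · rw [if_pos hc, hc]
    have hmem : runStatus r ∈ knownStatuses := by simpa using hc
    have hne : runStatus r ≠ "other" := by
      intro h; rw [h] at hmem; simp [knownStatuses] at hmem
    simp [hne]
  · rw [if_neg hc]
    have hm : knownStatuses.contains (runStatus r) = false := by
      cases h : knownStatuses.contains (runStatus r)
      · rfl
      · exact absurd h hc
    rw [hm]
    simp

lemma filter_keyOf_known (runs : List (List (String × String))) (k : String)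
    (hk : k ∈ knownStatuses) :
    runs.filter (fun r => keyOf r == k) = runs.filter (fun r => runStatus r == k) := by
  apply List.filter_congr
  intro r _
  unfold keyOf
  by_cases hc : knownStatuses.contains (runStatus r) = true
  · rw [if_pos hc]
  · rw [if_neg hc]
    have hm : runStatus r ∉ knownStatuses := by simpa using hc
    have h1 : ("other" : String) ≠ k := by
      intro h; rw [← h] at hk; simp [knownStatuses] at hk
    have h2 : runStatus r ≠ k := fun h => hm (h ▸ hk)
    simp [h1, h2]

-- the new keys appended by the fold: ["other"] iff some run is unmatched
lemma extra_eq (runs : List (List (String × String))) :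
    (PySem.Set.ofList (runs.map keyOf)).filter (fun y => !PySem.Set.contains knownStatuses y)
      = if (runs.filter (fun r => !(knownStatuses.contains (runStatus r)))).isEmpty
        then [] else ["other"] := by
  have hsc : ∀ y : String, PySem.Set.contains knownStatuses y = knownStatuses.contains y :=
    fun _ => rfl
  set others := runs.filter (fun r => !(knownStatuses.contains (runStatus r))) with hothers
  set extra := (PySem.Set.ofList (runs.map keyOf)).filter
      (fun y => !PySem.Set.contains knownStatuses y) with hextra
  have hall : ∀ y ∈ extra, y = "other" := by
    intro y hy
    rw [hextra, List.mem_filter] at hy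
    obtain ⟨hy1, hy2⟩ := hy
    rw [PySem.Set.mem_ofList, List.mem_map] at hy1
    obtain ⟨r, _, hr⟩ := hy1
    rw [← hr]
    rw [← hr, hsc] at hy2
    unfold keyOf at hy2 ⊢
    by_cases hc : knownStatuses.contains (runStatus r) = true
    · rw [if_pos hc] at hy2; rw [hc] at hy2; simp at hy2
    · rw [if_neg hc]
  have hnde : extra.Nodup := List.Nodup.filter _ (PySem.Set.nodup_ofList _)
  have hmem : ("other" ∈ extra) ↔ others ≠ [] := by
    rw [hextra, List.mem_filter, PySem.Set.mem_ofList, List.mem_map]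
    constructor
    · rintro ⟨⟨r, hr, hrk⟩, _⟩
      have hor : (keyOf r == "other") = true := by rw [hrk]; simp
      rw [keyOf_eq_other] at hor
      rw [hothers]
      simp only [ne_eq, List.filter_eq_nil_iff, not_forall]
      exact ⟨r, hr, by simpa using hor⟩
    · intro hne
      obtain ⟨r, hr⟩ := List.exists_mem_of_ne_nil others hne
      rw [hothers, List.mem_filter] at hr
      obtain ⟨hr1, hr2⟩ := hr
      refine ⟨⟨r, hr1, ?_⟩, by decide⟩
      have hko : (keyOf r == "other") = true := by rw [keyOf_eq_other]; exact hr2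
      simpa using hko
  rcases nodup_all_other extra hall hnde with he | he
  · rw [he]
    have hoe : others = [] := by
      by_contra hne
      have hmm := hmem.mpr hne
      rw [he] at hmm
      simp at hmm
    simp [hoe]
  · rw [he]
    have hne : others ≠ [] := by
      apply hmem.mp
      rw [he]; simp
    simp [List.isEmpty_iff, hne]

lemma main_eq (runs : List (List (String × String))) :
    group_runs_by_status runs = group_runs_by_status_alt runs := by
  unfold group_runs_by_status group_runs_by_status_alt
  simp only []
  set init : PySem.Dict String (List (List (String × String))) :=
    (((((PySem.Dict.empty.insert "completed" []).insert "failed" []).insert "running" []).insert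
        "cancelled" []).insert "pending" []) with hinit
  set others := runs.filter (fun r => !(knownStatuses.contains (runStatus r))) with hothers
  have hkeysinit : init.keys = knownStatuses := by decide
  have hfold : runs.foldl (fun d run =>
      let status := runStatus run
      if d.contains status then d.modify status [] (· ++ [run])
      else d.modify "other" [] (· ++ [run])) init
      = runs.foldl (fun d r => d.modify (keyOf r) [] (· ++ [r])) init := by
    apply foldA_eq_foldKey
    · intro s hs
      fin_cases hs <;> decide
    · intro s hcs
      have hsm : s ∈ init.keys := (PySem.Dict.contains_iff_mem_keys init s).mp hcs
      rw [hkeysinit] at hsm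
      exact Or.inl hsm
  rw [hfold]
  set final := runs.foldl (fun d r => d.modify (keyOf r) [] (· ++ [r])) init with hfinal
  have hnd : final.keys.Nodup := by
    apply PySem.Dict.nodup_keys_foldl_modify_key runs keyOf [] (fun _ r => (· ++ [r])) init
    rw [hkeysinit]; decide
  have hkeys : final.keys = knownStatuses ++ (if others.isEmpty then [] else ["other"]) := by
    rw [hfinal, key_fold_keys, hkeysinit, PySem.Set.update_eq_append_filter, extra_eq, hothers]
  have hgetD : ∀ c, final.getD c [] = init.getD c [] ++ runs.filter (fun r => keyOf r == c) := by
    intro c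
    rw [hfinal, key_fold_getD]
  have hothersval : final.getD "other" [] = others := by
    rw [hgetD "other"]
    have h0 : init.getD "other" [] = [] := by decide
    rw [h0, List.nil_append, hothers]
    apply List.filter_congr
    intro r _
    exact keyOf_eq_other r
  have hknownmap : knownStatuses.map (fun k => (k, final.getD k []))
      = knownStatuses.map (fun s => (s, runs.filter (fun r => runStatus r == s))) := by
    apply List.map_congr_left
    intro k hk
    rw [hgetD k, filter_keyOf_known runs k hk]
    have h0 : init.getD k [] = [] := by fin_cases hk <;> decide
    rw [h0, List.nil_append]
  rw [PySem.Dict.items_eq_map_keys final hnd [], hkeys, List.map_append, hknownmap]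
  by_cases he : others.isEmpty
  · simp [he]
  · simp [he, hothersval]

-- ===== VERDICT (by name: the statement is the Claim_ definition above) =====
theorem group_runs_by_status_spec : Claim_equal_group_runs_by_status := by
  intro runs _
  unfold Spec_group_runs_by_status
  exact main_eq runs
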